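-- pv_equiv track=rewrite | github.com/JumareKenz/hivabackend | services/ai/app/services/database_inspector.py | _infer_semantic_type
-- ===== SOURCE A (Python) =====
-- def _infer_semantic_type(column_name: str, data_type: str) -> str:
--     """Infer semantic meaning of a column"""
--     col_lower = column_name.lower()
--
--     if 'id' in col_lower:
--         if col_lower == 'id':
--             return 'primary_key'
--         return 'foreign_key'
--     elif any(x in col_lower for x in ['name', 'title', 'label']):
--         return 'identifier_text'
--     elif any(x in col_lower for x in ['email', 'phone', 'mobile', 'telephone']):
--         return 'contact_info'
--     elif any(x in col_lower for x in ['date', 'time', 'created', 'updated', 'timestamp']):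
--         return 'temporal'
--     elif any(x in col_lower for x in ['cost', 'price', 'amount', 'total', 'fee', 'charge']):
--         return 'monetary'
--     elif any(x in col_lower for x in ['count', 'number', 'quantity', 'qty']):
--         return 'numeric_count'
--     elif any(x in col_lower for x in ['status', 'state', 'type', 'category']):
--         return 'categorical'
--     elif any(x in col_lower for x in ['address', 'location', 'city', 'state', 'region']):
--         return 'geographic'
--     elif 'description' in col_lower or 'note' in col_lower or 'comment' in col_lower:
--         return 'text_content'
--     else:
--         return 'general'
-- ===== SOURCE B (Python) =====
-- # One flat keyword -> (priority, semantic type) map; a single pass over the map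
-- # keeps the matching keyword of minimal priority (= the earliest rule group).
-- # Correct because the first group of the original chain that matches is exactly
-- # the minimal-priority keyword that occurs in the column name.
-- _KEYWORDS = {
--     'id': (0, 'foreign_key'),
--     'name': (1, 'identifier_text'), 'title': (1, 'identifier_text'), 'label': (1, 'identifier_text'),
--     'email': (2, 'contact_info'), 'phone': (2, 'contact_info'), 'mobile': (2, 'contact_info'), 'telephone': (2, 'contact_info'),
--     'date': (3, 'temporal'), 'time': (3, 'temporal'), 'created': (3, 'temporal'), 'updated': (3, 'temporal'), 'timestamp': (3, 'temporal'),
--     'cost': (4, 'monetary'), 'price': (4, 'monetary'), 'amount': (4, 'monetary'), 'total': (4, 'monetary'), 'fee': (4, 'monetary'), 'charge': (4, 'monetary'),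
--     'count': (5, 'numeric_count'), 'number': (5, 'numeric_count'), 'quantity': (5, 'numeric_count'), 'qty': (5, 'numeric_count'),
--     'status': (6, 'categorical'), 'state': (6, 'categorical'), 'type': (6, 'categorical'), 'category': (6, 'categorical'),
--     'address': (7, 'geographic'), 'location': (7, 'geographic'), 'city': (7, 'geographic'), 'region': (7, 'geographic'),
--     'description': (8, 'text_content'), 'note': (8, 'text_content'), 'comment': (8, 'text_content'),
-- }
--
-- def _infer_semantic_type(column_name: str, data_type: str) -> str:
--     col = column_name.lower()
--     best = None
--     for kw, entry in _KEYWORDS.items():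
--         if kw in col and (best is None or entry[0] < best[0]):
--             best = entry
--     if best is None:
--         return 'general'
--     pri, sem = best
--     if pri == 0 and col == 'id':
--         return 'primary_key'
--     return sem
-- ===== Notes on version B (the rewrite author's own statement) =====
-- stated objective: alternative
-- what changed: B replaces the ordered elif chain of per-group substring tests by a flat keyword->(priority,type) dictionary scanned in one pass keeping the minimal-priority matching keyword; correct since the first matching group equals the minimal-priority match.
import Mathlib
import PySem

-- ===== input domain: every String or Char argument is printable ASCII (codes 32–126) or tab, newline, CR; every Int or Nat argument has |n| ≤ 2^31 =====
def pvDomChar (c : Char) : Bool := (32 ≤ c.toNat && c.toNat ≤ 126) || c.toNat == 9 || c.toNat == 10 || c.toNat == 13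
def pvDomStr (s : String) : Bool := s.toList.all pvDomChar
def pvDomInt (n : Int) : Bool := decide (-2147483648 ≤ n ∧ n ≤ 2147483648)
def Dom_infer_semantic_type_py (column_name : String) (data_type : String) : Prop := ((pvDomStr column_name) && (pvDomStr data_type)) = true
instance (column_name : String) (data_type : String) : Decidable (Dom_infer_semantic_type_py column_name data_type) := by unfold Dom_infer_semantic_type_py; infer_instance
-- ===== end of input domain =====

-- B replaces the elif chain by a single min-priority pass over a flat keyword->(priority,type) map (alternative algorithm, same cost).


-- ===== PORT A =====
def infer_semantic_type_py (column_name : String) (data_type : String) : String :=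
  let col_lower := PySem.Str.lower column_name
  if PySem.Str.isIn "id" col_lower then
    (if col_lower == "id" then "primary_key" else "foreign_key")
  else if ["name", "title", "label"].any (fun x => PySem.Str.isIn x col_lower) then "identifier_text"
  else if ["email", "phone", "mobile", "telephone"].any (fun x => PySem.Str.isIn x col_lower) then "contact_info"
  else if ["date", "time", "created", "updated", "timestamp"].any (fun x => PySem.Str.isIn x col_lower) then "temporal"
  else if ["cost", "price", "amount", "total", "fee", "charge"].any (fun x => PySem.Str.isIn x col_lower) then "monetary"
  else if ["count", "number", "quantity", "qty"].any (fun x => PySem.Str.isIn x col_lower) then "numeric_count"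
  else if ["status", "state", "type", "category"].any (fun x => PySem.Str.isIn x col_lower) then "categorical"
  else if ["address", "location", "city", "state", "region"].any (fun x => PySem.Str.isIn x col_lower) then "geographic"
  else if PySem.Str.isIn "description" col_lower || PySem.Str.isIn "note" col_lower || PySem.Str.isIn "comment" col_lower then "text_content"
  else "general"

-- ===== PORT B =====
-- flat keyword -> (priority, semantic type) map, in dict insertion order
def pvTable : List (String × Nat × String) :=
  [("id", 0, "foreign_key"),
   ("name", 1, "identifier_text"), ("title", 1, "identifier_text"), ("label", 1, "identifier_text"),
   ("email", 2, "contact_info"), ("phone", 2, "contact_info"), ("mobile", 2, "contact_info"), ("telephone", 2, "contact_info"),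
   ("date", 3, "temporal"), ("time", 3, "temporal"), ("created", 3, "temporal"), ("updated", 3, "temporal"), ("timestamp", 3, "temporal"),
   ("cost", 4, "monetary"), ("price", 4, "monetary"), ("amount", 4, "monetary"), ("total", 4, "monetary"), ("fee", 4, "monetary"), ("charge", 4, "monetary"),
   ("count", 5, "numeric_count"), ("number", 5, "numeric_count"), ("quantity", 5, "numeric_count"), ("qty", 5, "numeric_count"),
   ("status", 6, "categorical"), ("state", 6, "categorical"), ("type", 6, "categorical"), ("category", 6, "categorical"),
   ("address", 7, "geographic"), ("location", 7, "geographic"), ("city", 7, "geographic"), ("region", 7, "geographic"),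
   ("description", 8, "text_content"), ("note", 8, "text_content"), ("comment", 8, "text_content")]

-- one step of B's loop: keep the matching keyword of minimal priority
def pvStep (col : String) (best : Option (Nat × String)) (e : String × Nat × String) : Option (Nat × String) :=
  if PySem.Str.isIn e.1 col && (match best with | none => true | some (bp, _) => decide (e.2.1 < bp)) then
    some e.2
  else best

def infer_semantic_type_py_alt (column_name : String) (data_type : String) : String :=
  let col := PySem.Str.lower column_name
  match pvTable.foldl (pvStep col) none with
  | none => "general"
  | some (pri, sem) => if pri == 0 && col == "id" then "primary_key" else sem

-- ===== PRECONDITION & SPEC =====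
def Spec_infer_semantic_type_py (column_name : String) (data_type : String) (out : String) : Prop := out = infer_semantic_type_py_alt column_name data_type
instance (column_name : String) (data_type : String) (out : String) : Decidable (Spec_infer_semantic_type_py column_name data_type out) := by unfold Spec_infer_semantic_type_py; infer_instance

-- ===== CLAIM (what is proved, stated in full; the proofs are below) =====
def Claim_equal_infer_semantic_type_py : Prop := ∀ (column_name : String) (data_type : String), Dom_infer_semantic_type_py column_name data_type → Spec_infer_semantic_type_py column_name data_type (infer_semantic_type_py column_name data_type)

-- ===== LEMMAS AND PROOFS =====

-- once the accumulator holds a priority no later entry beats, the fold is constant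
theorem pvStep_absorb (col : String) (p : Nat) (s : String) :
    ∀ (l : List (String × Nat × String)), (∀ e ∈ l, p ≤ e.2.1) →
    List.foldl (pvStep col) (some (p, s)) l = some (p, s) := by
  intro l
  induction l with
  | nil => intro _; rfl
  | cons e t ih =>
    intro h
    have hp : p ≤ e.2.1 := h e (List.mem_cons_self ..)
    have : pvStep col (some (p, s)) e = some (p, s) := by
      unfold pvStep
      have : decide (e.2.1 < p) = false := by simp; omega
      simp [this]
    simp only [List.foldl_cons, this]
    exact ih (fun e' he' => h e' (List.mem_cons_of_mem _ he'))

-- folding through one rule group (all entries sharing priority p and type s),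
-- followed by entries of priority ≥ p, returns the group's entry iff some keyword matches
theorem pvStep_group (col : String) (p : Nat) (s : String) :
    ∀ (kws : List String) (rest : List (String × Nat × String)), (∀ e ∈ rest, p ≤ e.2.1) →
    List.foldl (pvStep col) none (kws.map (fun k => (k, p, s)) ++ rest) =
    if kws.any (fun k => PySem.Str.isIn k col) then some (p, s)
    else List.foldl (pvStep col) none rest := by
  intro kws
  induction kws with
  | nil => intro rest _; simp
  | cons k t ih =>
    intro rest hrest
    by_cases hk : PySem.Str.isIn k col = true
    · have hstep : pvStep col none (k, p, s) = some (p, s) := by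
        simp only [PySem.Str.isIn] at hk
        unfold pvStep; simp [hk]
      simp only [List.map_cons, List.cons_append, List.foldl_cons, hstep, List.any_cons, hk,
        Bool.true_or, if_pos rfl]
      apply pvStep_absorb
      intro e he
      rcases List.mem_append.mp he with hm | hm
      · rcases List.mem_map.mp hm with ⟨k', _, rfl⟩; exact le_refl p
      · exact hrest e hm
    · have hstep : pvStep col none (k, p, s) = none := by
        simp only [PySem.Str.isIn, Bool.not_eq_true] at hk
        unfold pvStep; simp [hk]
      simp only [List.map_cons, List.cons_append, List.foldl_cons, hstep, List.any_cons,
        Bool.eq_false_iff.mpr hk, Bool.false_or]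
      exact ih rest hrest

-- ===== VERDICT (by name: the statement is the Claim_ definition above) =====
theorem infer_semantic_type_py_spec : Claim_equal_infer_semantic_type_py := by
  intro column_name data_type _
  unfold Spec_infer_semantic_type_py infer_semantic_type_py infer_semantic_type_py_alt
  dsimp only
  set col := PySem.Str.lower column_name with hcol
  have htab : pvTable =
      (["id"].map (fun k => (k, 0, "foreign_key"))) ++
      ((["name", "title", "label"].map (fun k => (k, 1, "identifier_text"))) ++
      ((["email", "phone", "mobile", "telephone"].map (fun k => (k, 2, "contact_info"))) ++
      ((["date", "time", "created", "updated", "timestamp"].map (fun k => (k, 3, "temporal"))) ++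
      ((["cost", "price", "amount", "total", "fee", "charge"].map (fun k => (k, 4, "monetary"))) ++
      ((["count", "number", "quantity", "qty"].map (fun k => (k, 5, "numeric_count"))) ++
      ((["status", "state", "type", "category"].map (fun k => (k, 6, "categorical"))) ++
      ((["address", "location", "city", "region"].map (fun k => (k, 7, "geographic"))) ++
      ((["description", "note", "comment"].map (fun k => (k, 8, "text_content"))) ++ ([]))))))))) := by
    decide
  rw [htab]
  rw [pvStep_group col 0 _ _ _ (by decide)]
  rw [pvStep_group col 1 _ _ _ (by decide)]
  rw [pvStep_group col 2 _ _ _ (by decide)]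
  rw [pvStep_group col 3 _ _ _ (by decide)]
  rw [pvStep_group col 4 _ _ _ (by decide)]
  rw [pvStep_group col 5 _ _ _ (by decide)]
  rw [pvStep_group col 6 _ _ _ (by decide)]
  rw [pvStep_group col 7 _ _ _ (by decide)]
  rw [pvStep_group col 8 _ _ _ (by decide)]
  by_cases hid : PySem.Chars.isIn ['i', 'd'] col.toList = true
  · simp [PySem.Str.isIn, hid]
  · by_cases hstate : PySem.Chars.isIn ['s', 't', 'a', 't', 'e'] col.toList = true
    · simp only [PySem.Str.isIn, hid, hstate]
      simp [hid, hstate]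
      split_ifs <;> simp_all
    · simp only [PySem.Str.isIn, hid, hstate]
      simp [hid, hstate]
      split_ifs <;> simp_all
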